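-- pv_equiv track=rewrite | github.com/Txtxiao/- | utils/tree/astprocess.py | hash_method
-- ===== SOURCE A (Python) =====
-- def hash_method(s, length):
--     v = 0
--     c_list = list(s)
--     for c in c_list:
--         v *= 10
--         v += ord(c)
--     base = pow(10, length - 1)
--     return v % base
-- ===== SOURCE B (Python) =====
-- def hash_method(s, length):
--     k = length - 1
--     if k < 1:
--         return 0
--     tail = s[-k:]
--     total = 0
--     p = 1
--     for c in reversed(tail):
--         total += ord(c) * p
--         p *= 10
--     return total % 10 ** k
-- ===== Notes on version B (the rewrite author's own statement) =====
-- stated objective: faster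
-- what changed: B uses the identity v mod 10^(length-1) = (weighted sum of only the last length-1 characters) mod 10^(length-1): it slices that suffix and accumulates ord(c)*weight back-to-front with a running power of ten, never touching the rest of the string, instead of A's front-to-back Horner pass over every character.
-- outside the precondition, e.g. on hash_method('ab', 0): A returns 0.09999999999994072, B returns 0
import Mathlib
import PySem

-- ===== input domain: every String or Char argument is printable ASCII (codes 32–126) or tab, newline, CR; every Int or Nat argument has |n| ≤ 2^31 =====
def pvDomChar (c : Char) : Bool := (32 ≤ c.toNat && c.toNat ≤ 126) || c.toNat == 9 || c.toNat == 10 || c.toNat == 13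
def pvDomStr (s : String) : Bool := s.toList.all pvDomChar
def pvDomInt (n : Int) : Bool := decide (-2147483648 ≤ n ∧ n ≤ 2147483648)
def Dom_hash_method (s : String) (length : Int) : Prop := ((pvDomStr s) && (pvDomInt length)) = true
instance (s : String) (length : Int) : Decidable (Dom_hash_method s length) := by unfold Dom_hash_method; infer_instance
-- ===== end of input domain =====

-- B computes the same hash from only the last (length-1) characters (the rest vanishes mod
-- 10^(length-1)) by a back-to-front weighted sum over that suffix; faster when the string is
-- much longer than `length`.

-- ===== PORT A =====
-- Horner accumulation over all characters, one final modulus; exponent (length-1).toNat is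
-- exact under Pre_ (length ≥ 1), where Python's pow(10, length-1) is the integer 10^(length-1).
def hash_method (s : String) (length : Int) : Int :=
  let v := s.toList.foldl (fun v c => v * 10 + (c.toNat : Int)) 0
  let base : Int := 10 ^ (length - 1).toNat
  PySem.Int.mod v base

-- ===== PORT B =====
def hash_method_alt (s : String) (length : Int) : Int :=
  let k := length - 1
  if k < 1 then 0
  else
    let tail := PySem.List.slice s.toList (some (-k)) none       -- s[-k:]
    let st := tail.reverse.foldl                                  -- back-to-front, running weight
      (fun (st : Int × Int) c => (st.1 + (c.toNat : Int) * st.2, st.2 * 10)) (0, 1)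
    PySem.Int.mod st.1 (10 ^ k.toNat)

-- ===== PRECONDITION & SPEC =====
-- Pre_ excludes length ≤ 0, where pow(10, length - 1) is a float in Python and A returns a
-- float, not an int of the declared type.
def Pre_hash_method (s : String) (length : Int) : Prop := 1 ≤ length
instance (s : String) (length : Int) : Decidable (Pre_hash_method s length) := by unfold Pre_hash_method; infer_instance
def pvWitness_hash_method : String × Int := ("ab", 3)
def Spec_hash_method (s : String) (length : Int) (out : Int) : Prop := out = hash_method_alt s length
instance (s : String) (length : Int) (out : Int) : Decidable (Spec_hash_method s length out) := by unfold Spec_hash_method; infer_instance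

-- ===== CLAIM (what is proved, stated in full; the proofs are below) =====
def Claim_equal_hash_method : Prop := ∀ (s : String) (length : Int), Dom_hash_method s length → Pre_hash_method s length → Spec_hash_method s length (hash_method s length)

-- ===== LEMMAS AND PROOFS =====

-- pvW r = Σ_i r[i] * 10^i, the value of a reversed digit list (least-significant first).
def pvW : List Char → Int
  | [] => 0
  | c :: r => (c.toNat : Int) + 10 * pvW r

theorem pvW_append (r₁ r₂ : List Char) :
    pvW (r₁ ++ r₂) = pvW r₁ + 10 ^ r₁.length * pvW r₂ := by
  induction r₁ with
  | nil => simp [pvW]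
  | cons c r ih => simp [pvW, ih, pow_succ]; ring

-- B's suffix fold carrying (total, weight) computes (a + p * pvW r, p * 10^len).
theorem pvE_fold (r : List Char) (a p : Int) :
    r.foldl (fun (st : Int × Int) c => (st.1 + (c.toNat : Int) * st.2, st.2 * 10)) (a, p)
      = (a + p * pvW r, p * 10 ^ r.length) := by
  induction r generalizing a p with
  | nil => simp [pvW]
  | cons c r ih =>
    rw [List.foldl_cons, ih]
    simp [pvW, pow_succ]
    constructor <;> ring

-- A's Horner fold computes a * 10^len + pvW l.reverse.
theorem pvH_fold (l : List Char) (a : Int) :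
    l.foldl (fun v c => v * 10 + (c.toNat : Int)) a
      = a * 10 ^ l.length + pvW l.reverse := by
  induction l generalizing a with
  | nil => simp [pvW]
  | cons c l ih =>
    rw [List.foldl_cons, ih, List.reverse_cons, pvW_append]
    simp [pvW, pow_succ]
    ring

-- Only the first k entries of a reversed digit list matter mod 10^k.
theorem pvW_mod_take (r : List Char) (k : Nat) :
    pvW r % ((10 : Int) ^ k) = pvW (r.take k) % ((10 : Int) ^ k) := by
  rcases Nat.lt_or_ge r.length k with h | h
  · rw [List.take_of_length_le (Nat.le_of_lt h)]
  · conv_lhs => rw [← List.take_append_drop k r, pvW_append]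
    rw [List.length_take_of_le h, Int.add_mul_emod_self_left]

-- ===== VERDICT (by name: the statement is the Claim_ definition above) =====
theorem hash_method_spec : Claim_equal_hash_method := by
  intro s length _ hpre
  unfold Spec_hash_method hash_method hash_method_alt
  have hpos : (0 : Int) < 10 ^ (length - 1).toNat := by positivity
  by_cases hk : length - 1 < 1
  · -- length = 1: base = 10^0 = 1, everything is 0 mod 1
    have h0 : (length - 1).toNat = 0 := by omega
    simp only [if_pos hk, h0, pow_zero]
    rw [PySem.Int.mod_eq_emod_of_pos one_pos, Int.emod_one]
  · -- length ≥ 2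
    simp only [if_neg hk]
    have hk1 : (1 : Int) ≤ length - 1 := by omega
    have hknat : 0 < (length - 1).toNat := by omega
    have hneg : -(length - 1) = -(((length - 1).toNat : Nat) : Int) := by
      rw [Int.toNat_of_nonneg (by omega)]
    rw [PySem.List.slice_some_none, hneg, PySem.List.clampIdx_neg_natCast _ _ hknat,
        List.take_reverse.symm]
    rw [pvE_fold (s.toList.reverse.take (length - 1).toNat) 0 1, pvH_fold]
    simp only [zero_add, one_mul, zero_mul]
    rw [PySem.Int.mod_eq_emod_of_pos hpos, PySem.Int.mod_eq_emod_of_pos hpos,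
        pvW_mod_take s.toList.reverse (length - 1).toNat]
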